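-- pv_equiv track=rewrite | github.com/josephxwang/aoc23 | 5.py | loc_to_seed
-- ===== SOURCE A (Python) =====
-- def loc_to_seed(n, lines):
--     lines = lines[2:][::-1] # reverse input
--     is_next = False
--     for i in range(2,len(lines)):
--         if lines[i] == '':
--             is_next = False
--         elif lines[i][0].isalpha():
--             continue
--         else:
--             dest,src,length = map(int,lines[i].split())
--             if not is_next and 0 <= n-dest < length:
--                 n = n-dest+src
--                 is_next = True
--     return n
-- ===== SOURCE B (Python) =====
-- def _apply_block(n, block):
--     for line in block:
--         if line[0].isalpha():
--             continue
--         dest, src, length = map(int, line.split())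
--         if 0 <= n - dest < length:
--             return n - dest + src
--     return n
--
-- def loc_to_seed(n, lines):
--     work = lines[2:][::-1][2:]
--     while work:
--         i = 0
--         while i < len(work) and work[i] != '':
--             i += 1
--         block, work = work[:i], work[i + 1:]
--         n = _apply_block(n, block)
--     return n
-- ===== Notes on version B (the rewrite author's own statement) =====
-- stated objective: alternative
-- what changed: A's single flat loop over indices with an is_next suppression flag is replaced by a block-structured traversal: the work list is split on blank lines and each block applies its first matching (dest,src,length) rule with an early return, so the flag disappears.
import Mathlib
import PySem

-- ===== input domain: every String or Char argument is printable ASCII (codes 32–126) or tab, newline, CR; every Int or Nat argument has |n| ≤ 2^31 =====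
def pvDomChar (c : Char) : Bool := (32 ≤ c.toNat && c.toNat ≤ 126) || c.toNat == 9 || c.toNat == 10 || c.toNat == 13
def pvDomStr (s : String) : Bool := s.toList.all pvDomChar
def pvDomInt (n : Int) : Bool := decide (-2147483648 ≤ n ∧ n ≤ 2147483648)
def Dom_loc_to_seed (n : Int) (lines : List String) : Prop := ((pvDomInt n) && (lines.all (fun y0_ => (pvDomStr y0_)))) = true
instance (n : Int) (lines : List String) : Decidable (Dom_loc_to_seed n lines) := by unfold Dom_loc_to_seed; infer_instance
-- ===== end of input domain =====

-- B replaces A's flat index loop with an `is_next` flag by a block-structured traversal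
-- (split the work list on blank lines, apply the first matching rule per block with an early
-- return); objective: alternative decomposition, same cost.

-- ===== PORT A =====
-- shared helper: `dest,src,length = map(int, s.split())` — some iff s splits into exactly 3 int()-parsable tokens
def pvParse3 (s : String) : Option (Int × Int × Int) :=
  match PySem.Str.split₀ s with
  | [a, b, c] =>
    match PySem.Int.ofStr? a, PySem.Int.ofStr? b, PySem.Int.ofStr? c with
    | some x, some y, some z => some (x, y, z)
    | _, _, _ => none
  | _ => none

-- shared helper: s[0].isalpha() (false on the empty string; only reached on nonempty s)
def pvAlphaFirst (s : String) : Bool :=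
  match PySem.Str.pyGet? s 0 with
  | some c => PySem.Chars.isalpha c
  | none => false

-- A's loop body on state (n, is_next); unparseable lines (where Python raises, outside Pre_) are skipped
def pvStepA (st : Int × Bool) (s : String) : Int × Bool :=
  if s = "" then (st.1, false)
  else if pvAlphaFirst s then st
  else match pvParse3 s with
    | some (dest, src, len) =>
      if st.2 = false ∧ 0 ≤ st.1 - dest ∧ st.1 - dest < len then (st.1 - dest + src, true) else st
    | none => st

def loc_to_seed (n : Int) (lines : List String) : Int :=
  let work := (PySem.List.slice lines (some 2) none).reverse   -- lines[2:][::-1]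
  ((PySem.List.pyRange 2 (work.length : Int) 1).foldl
      (fun (st : Int × Bool) i => pvStepA st (PySem.List.pyGetD work i ""))
      (n, false)).1

-- ===== PORT B =====
-- first matching rule of a block (blocks never contain ''); unparseable lines skipped as in port A
def pvApplyBlock (n : Int) : List String → Int
  | [] => n
  | s :: rest =>
    if pvAlphaFirst s then pvApplyBlock n rest
    else match pvParse3 s with
      | some (dest, src, len) =>
        if 0 ≤ n - dest ∧ n - dest < len then n - dest + src else pvApplyBlock n rest
      | none => pvApplyBlock n rest

-- termination of the while-loop over the remaining work list
theorem pvBlocksDec (s : String) (rest : List String) :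
    ((List.dropWhile (· ≠ "") (s :: rest)).drop 1).length < (s :: rest).length := by
  have h1 := List.length_dropWhile_le (p := (· ≠ "")) (l := s :: rest)
  simp only [List.length_drop, List.length_cons] at *
  omega

def pvProcBlocks (n : Int) : List String → Int
  | [] => n
  | s :: rest =>
    pvProcBlocks (pvApplyBlock n ((s :: rest).takeWhile (· ≠ "")))
      (((s :: rest).dropWhile (· ≠ "")).drop 1)
termination_by ws => ws.length
decreasing_by exact pvBlocksDec s rest

def loc_to_seed_alt (n : Int) (lines : List String) : Int :=
  pvProcBlocks n (((PySem.List.slice lines (some 2) none).reverse).drop 2)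

-- ===== PRECONDITION & SPEC =====
-- Pre_ excludes exactly the inputs where Python A raises: a processed line (index ≥ 2 of the
-- reversed lines[2:]) that is nonempty, does not start with a letter, and does not split into
-- exactly three int()-parsable tokens makes A raise (ValueError / unpack error).
def Pre_loc_to_seed (n : Int) (lines : List String) : Prop :=
  ∀ s ∈ ((lines.drop 2).reverse.drop 2), s = "" ∨ pvAlphaFirst s = true ∨ (pvParse3 s).isSome
instance (n : Int) (lines : List String) : Decidable (Pre_loc_to_seed n lines) := by
  unfold Pre_loc_to_seed; infer_instance

def pvWitness_loc_to_seed : Int × List String :=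
  (75, ["seeds: 79", "", "seed-to-soil map:", "50 98 2", "52 50 48", "", "soil-to-fert map:", "0 15 37", "39 0 15"])

def Spec_loc_to_seed (n : Int) (lines : List String) (out : Int) : Prop := out = loc_to_seed_alt n lines
instance (n : Int) (lines : List String) (out : Int) : Decidable (Spec_loc_to_seed n lines out) := by unfold Spec_loc_to_seed; infer_instance

-- ===== CLAIM (what is proved, stated in full; the proofs are below) =====
def Claim_equal_loc_to_seed : Prop := ∀ (n : Int) (lines : List String), Dom_loc_to_seed n lines → Pre_loc_to_seed n lines → Spec_loc_to_seed n lines (loc_to_seed n lines)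

-- ===== LEMMAS AND PROOFS =====

-- with is_next = True, n is frozen until just after the next blank line
theorem pvFoldl_true (ls : List String) (n : Int) :
    (List.foldl pvStepA (n, true) ls).1
      = (List.foldl pvStepA (n, false) ((ls.dropWhile (· ≠ "")).drop 1)).1 := by
  induction ls generalizing n with
  | nil => rfl
  | cons s ls ih =>
    by_cases hs : s = ""
    · subst hs; simp [pvStepA]
    · have hstep : pvStepA (n, true) s = (n, true) := by
        simp only [pvStepA, hs, if_false]
        by_cases ha : pvAlphaFirst s
        · simp [ha]
        · simp only [ha]
          cases hp : pvParse3 s with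
          | none => rfl
          | some t => obtain ⟨d, sr, l⟩ := t; simp
      rw [List.foldl_cons, hstep, ih]
      have hdw : List.dropWhile (· ≠ "") (s :: ls) = List.dropWhile (· ≠ "") ls := by
        simp [List.dropWhile, hs]
      rw [hdw]

-- one block step: running the flat loop from (n, false) equals applying the first
-- matching rule of the leading block, then continuing after the next blank line
theorem pvFoldl_block (ls : List String) (n : Int) :
    (List.foldl pvStepA (n, false) ls).1
      = (List.foldl pvStepA (pvApplyBlock n (ls.takeWhile (· ≠ "")), false)
          ((ls.dropWhile (· ≠ "")).drop 1)).1 := by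
  induction ls generalizing n with
  | nil => rfl
  | cons s ls ih =>
    by_cases hs : s = ""
    · subst hs; simp [pvStepA, List.takeWhile, List.dropWhile, pvApplyBlock]
    · have htw : List.takeWhile (· ≠ "") (s :: ls) = s :: List.takeWhile (· ≠ "") ls := by
        simp [List.takeWhile, hs]
      have hdw : List.dropWhile (· ≠ "") (s :: ls) = List.dropWhile (· ≠ "") ls := by
        simp [List.dropWhile, hs]
      rw [htw, hdw]
      by_cases ha : pvAlphaFirst s
      · have hstep : pvStepA (n, false) s = (n, false) := by simp [pvStepA, hs, ha]
        rw [List.foldl_cons, hstep, ih]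
        simp [pvApplyBlock, ha]
      · cases hp : pvParse3 s with
        | none =>
          have hstep : pvStepA (n, false) s = (n, false) := by simp [pvStepA, hs, ha, hp]
          rw [List.foldl_cons, hstep, ih]
          simp [pvApplyBlock, ha, hp]
        | some t =>
          obtain ⟨d, sr, l⟩ := t
          by_cases hm : 0 ≤ n - d ∧ n - d < l
          · have hstep : pvStepA (n, false) s = (n - d + sr, true) := by
              simp only [pvStepA, hs, if_false, ha, Bool.false_eq_true, hp]
              rw [if_pos ⟨trivial, hm.1, hm.2⟩]
            have happ : pvApplyBlock n (s :: List.takeWhile (· ≠ "") ls) = n - d + sr := by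
              simp only [pvApplyBlock, ha, Bool.false_eq_true, if_false, hp]
              rw [if_pos hm]
            rw [List.foldl_cons, hstep, pvFoldl_true, happ]
          · have hstep : pvStepA (n, false) s = (n, false) := by
              simp only [pvStepA, hs, if_false, ha, Bool.false_eq_true, hp]
              rw [if_neg (fun h => hm ⟨h.2.1, h.2.2⟩)]
            have happ : pvApplyBlock n (s :: List.takeWhile (· ≠ "") ls)
                = pvApplyBlock n (List.takeWhile (· ≠ "") ls) := by
              simp only [pvApplyBlock, ha, Bool.false_eq_true, if_false, hp]
              rw [if_neg hm]
            rw [List.foldl_cons, hstep, ih, happ]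

-- the flat flag loop equals the block-structured traversal (induction on length)
theorem pvFoldl_eq_procBlocks (k : Nat) :
    ∀ (ws : List String), ws.length ≤ k → ∀ (n : Int),
      (List.foldl pvStepA (n, false) ws).1 = pvProcBlocks n ws := by
  induction k with
  | zero =>
    intro ws hw n
    have hnil : ws = [] := List.eq_nil_of_length_eq_zero (by omega)
    subst hnil; simp [pvProcBlocks]
  | succ k ih =>
    intro ws hw n
    cases ws with
    | nil => simp [pvProcBlocks]
    | cons s rest =>
      rw [pvFoldl_block]
      have hlt := pvBlocksDec s rest
      rw [ih _ (by simp only [List.length_cons] at *; omega)]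
      conv_rhs => rw [pvProcBlocks]

-- ===== VERDICT (by name: the statement is the Claim_ definition above) =====
theorem loc_to_seed_spec : Claim_equal_loc_to_seed := by
  intro n lines _ _
  show loc_to_seed n lines = loc_to_seed_alt n lines
  simp only [loc_to_seed, loc_to_seed_alt]
  rw [PySem.List.slice_from lines (a := 2) (by norm_num),
    show ((2:Int).toNat) = 2 from rfl]
  rw [show (2:Int) = ((2:Nat):Int) from rfl,
    PySem.List.foldl_pyRange_pyGetD' ((lines.drop 2).reverse) "" pvStepA (n, false)
      (by positivity)]
  exact pvFoldl_eq_procBlocks _ _ (le_refl _) n
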